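-- pv_equiv track=rewrite | github.com/abhirupchak/Python-programs | prog5.py | str_ops
-- ===== SOURCE A (Python) =====
-- def str_ops(s, target, repl):
--     # Part (a): Find the frequency of a character in a string
--     freq = 0
--     for c in s:
--         if c == target:
--             freq += 1
--
--     # Part (b): Replace a character by another character in a string
--     replaced = ""
--     for c in s:
--         if c == target:
--             replaced += repl
--         else:
--             replaced += c
--
--     # Part (c): Remove the first occurrence of a character from a string
--     removed_first = ""
--     found = False
--     for c in s:
--         if c == target and not found:
--             found = True
--             continue
--         removed_first += c
--
--     # Part (d): Remove all occurrences of a character from a string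
--     removed_all = ""
--     for c in s:
--         if c != target:
--             removed_all += c
--
--     return freq, replaced, removed_first, removed_all
-- ===== SOURCE B (Python) =====
-- def str_ops(s, target, repl):
--     # Single pass over s with list buffers, instead of A's four separate loops
--     # building strings by repeated concatenation.
--     freq = 0
--     replaced = []
--     removed_first = []
--     removed_all = []
--     found = False
--     for c in s:
--         if c == target:
--             freq += 1
--             replaced.append(repl)
--             if found:
--                 removed_first.append(c)
--             found = True
--         else:
--             replaced.append(c)
--             removed_first.append(c)
--             removed_all.append(c)
--     return freq, "".join(replaced), "".join(removed_first), "".join(removed_all)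
-- ===== Notes on version B (the rewrite author's own statement) =====
-- stated objective: alternative
-- what changed: Replaced A's four separate loops over s (each building a string by repeated concatenation) with one single pass that maintains all four results at once in list buffers joined at the end.
import Mathlib
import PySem

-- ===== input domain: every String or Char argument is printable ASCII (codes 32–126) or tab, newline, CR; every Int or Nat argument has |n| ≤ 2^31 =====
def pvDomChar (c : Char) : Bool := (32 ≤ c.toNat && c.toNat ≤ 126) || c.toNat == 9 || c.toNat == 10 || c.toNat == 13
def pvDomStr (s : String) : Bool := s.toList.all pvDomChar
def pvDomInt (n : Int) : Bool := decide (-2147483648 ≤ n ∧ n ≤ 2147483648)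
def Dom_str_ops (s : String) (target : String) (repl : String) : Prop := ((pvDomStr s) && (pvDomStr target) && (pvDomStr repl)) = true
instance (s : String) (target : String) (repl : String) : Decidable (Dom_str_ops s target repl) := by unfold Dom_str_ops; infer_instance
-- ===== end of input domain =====

-- B fuses A's four separate string-building loops into one single pass with list buffers
-- joined at the end (objective: alternative decomposition).

-- ===== PORT A =====
-- A: four separate loops over s, each building its result by string concatenation.
def str_ops (s : String) (target : String) (repl : String) : Int × String × String × String :=
  let freq : Int := s.toList.foldl
    (fun freq c => if String.mk [c] = target then freq + 1 else freq) 0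
  let replaced : String := s.toList.foldl
    (fun replaced c => if String.mk [c] = target then replaced ++ repl
                       else replaced ++ String.mk [c]) ""
  let rf : String × Bool := s.toList.foldl
    (fun (p : String × Bool) c =>
      if String.mk [c] = target ∧ p.2 = false then (p.1, true)
      else (p.1 ++ String.mk [c], p.2)) ("", false)
  let removed_all : String := s.toList.foldl
    (fun removed_all c => if String.mk [c] = target then removed_all
                          else removed_all ++ String.mk [c]) ""
  (freq, replaced, rf.1, removed_all)

-- ===== PORT B =====
-- B: one fold over s maintaining (freq, replaced, removed_first, removed_all, found),
-- with the three string results as list buffers joined at the end.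
def str_ops_alt (s : String) (target : String) (repl : String) : Int × String × String × String :=
  let st := s.toList.foldl
    (fun (st : Int × List String × List String × List String × Bool) c =>
      let (f, rp, rf, ra, found) := st
      if String.mk [c] = target then
        (f + 1, rp ++ [repl], (if found then rf ++ [String.mk [c]] else rf), ra, true)
      else
        (f, rp ++ [String.mk [c]], rf ++ [String.mk [c]], ra ++ [String.mk [c]], found))
    (0, [], [], [], false)
  (st.1, String.join st.2.1, String.join st.2.2.1, String.join st.2.2.2.1)

-- ===== PRECONDITION & SPEC =====
def Spec_str_ops (s : String) (target : String) (repl : String) (out : Int × String × String × String) : Prop := out = str_ops_alt s target repl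
instance (s : String) (target : String) (repl : String) (out : Int × String × String × String) : Decidable (Spec_str_ops s target repl out) := by unfold Spec_str_ops; infer_instance

-- ===== CLAIM (what is proved, stated in full; the proofs are below) =====
def Claim_equal_str_ops : Prop := ∀ (s : String) (target : String) (repl : String), Dom_str_ops s target repl → Spec_str_ops s target repl (str_ops s target repl)

-- ===== LEMMAS AND PROOFS =====

theorem join_snoc (l : List String) (x : String) :
    String.join (l ++ [x]) = String.join l ++ x := by
  induction l with
  | nil => simp [String.join]
  | cons a t ih => simp [String.join]


-- The fused fold of B, started from arbitrary accumulators, computes componentwise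
-- exactly the four folds of A started from the joins of those accumulators.
theorem fused_eq (target repl : String) (l : List Char)
    (f : Int) (rp rf ra : List String) (found : Bool) :
    (l.foldl
      (fun (st : Int × List String × List String × List String × Bool) c =>
        let (f, rp, rf, ra, found) := st
        if String.mk [c] = target then
          (f + 1, rp ++ [repl], (if found then rf ++ [String.mk [c]] else rf), ra, true)
        else
          (f, rp ++ [String.mk [c]], rf ++ [String.mk [c]], ra ++ [String.mk [c]], found))
      (f, rp, rf, ra, found)).1
      = l.foldl (fun freq c => if String.mk [c] = target then freq + 1 else freq) f
  ∧ String.join (l.foldl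
      (fun (st : Int × List String × List String × List String × Bool) c =>
        let (f, rp, rf, ra, found) := st
        if String.mk [c] = target then
          (f + 1, rp ++ [repl], (if found then rf ++ [String.mk [c]] else rf), ra, true)
        else
          (f, rp ++ [String.mk [c]], rf ++ [String.mk [c]], ra ++ [String.mk [c]], found))
      (f, rp, rf, ra, found)).2.1
      = l.foldl (fun replaced c => if String.mk [c] = target then replaced ++ repl
                                   else replaced ++ String.mk [c]) (String.join rp)
  ∧ (String.join (l.foldl
      (fun (st : Int × List String × List String × List String × Bool) c =>
        let (f, rp, rf, ra, found) := st
        if String.mk [c] = target then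
          (f + 1, rp ++ [repl], (if found then rf ++ [String.mk [c]] else rf), ra, true)
        else
          (f, rp ++ [String.mk [c]], rf ++ [String.mk [c]], ra ++ [String.mk [c]], found))
      (f, rp, rf, ra, found)).2.2.1,
     (l.foldl
      (fun (st : Int × List String × List String × List String × Bool) c =>
        let (f, rp, rf, ra, found) := st
        if String.mk [c] = target then
          (f + 1, rp ++ [repl], (if found then rf ++ [String.mk [c]] else rf), ra, true)
        else
          (f, rp ++ [String.mk [c]], rf ++ [String.mk [c]], ra ++ [String.mk [c]], found))
      (f, rp, rf, ra, found)).2.2.2.2)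
      = l.foldl (fun (p : String × Bool) c =>
          if String.mk [c] = target ∧ p.2 = false then (p.1, true)
          else (p.1 ++ String.mk [c], p.2)) (String.join rf, found)
  ∧ String.join (l.foldl
      (fun (st : Int × List String × List String × List String × Bool) c =>
        let (f, rp, rf, ra, found) := st
        if String.mk [c] = target then
          (f + 1, rp ++ [repl], (if found then rf ++ [String.mk [c]] else rf), ra, true)
        else
          (f, rp ++ [String.mk [c]], rf ++ [String.mk [c]], ra ++ [String.mk [c]], found))
      (f, rp, rf, ra, found)).2.2.2.1
      = l.foldl (fun removed_all c => if String.mk [c] = target then removed_all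
                                      else removed_all ++ String.mk [c]) (String.join ra) := by
  induction l generalizing f rp rf ra found with
  | nil => simp
  | cons c t ih =>
    by_cases h : String.mk [c] = target
    · rcases found with _ | _
      · simpa [h, join_snoc] using ih (f + 1) (rp ++ [repl]) rf ra true
      · simpa [h, join_snoc] using
          ih (f + 1) (rp ++ [repl]) (rf ++ [String.mk [c]]) ra true
    · simpa [h, join_snoc] using
        ih f (rp ++ [String.mk [c]]) (rf ++ [String.mk [c]]) (ra ++ [String.mk [c]]) found

-- ===== VERDICT (by name: the statement is the Claim_ definition above) =====
theorem str_ops_spec : Claim_equal_str_ops := by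
  intro s target repl _
  unfold Spec_str_ops str_ops str_ops_alt
  obtain ⟨h1, h2, h3, h4⟩ := fused_eq target repl s.toList 0 [] [] [] false
  simp only [String.join] at h1 h2 h3 h4
  refine Prod.ext h1.symm (Prod.ext h2.symm (Prod.ext ?_ h4.symm))
  simpa using congrArg Prod.fst h3.symm
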